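-- pv_equiv track=rewrite | github.com/gcward18/leetcode | amazonMathGame.py | getMaxTotalArea
-- ===== SOURCE A (Python) =====
-- def getMaxTotalArea(sideLengths: list[int]) -> int:
--     sideLengths.sort(reverse=True)
--     pairs = []
--     added = set()
--
--     for i in range(1, len(sideLengths)):
--         if (sideLengths[i] == sideLengths[i-1] or
--             sideLengths[i] == sideLengths[i-1] - 1) and i not in added and i - 1 not in added:
--             pairs.append([sideLengths[i-1], sideLengths[i]])
--             added.add(i-1)
--             added.add(i)
--             i += 1
--
--
--     i = 1
--     total = 0
--
--     while i < len(pairs):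
--         total += min(pairs[i]) * min(pairs[i-1])
--         i += 2
--
--     return total
-- ===== SOURCE B (Python) =====
-- def getMaxTotalArea(sideLengths: list[int]) -> int:
--     # Single accumulator scan over the descending-sorted list (sorted in place, like A):
--     # a 'pending' pair-min replaces A's pairs list and 'added' set; a trailing unpaired
--     # pair-min is simply never multiplied in, matching A's while-loop.
--     sideLengths.sort(reverse=True)
--     total = 0
--     pending = None
--     i = 1
--     while i < len(sideLengths):
--         if sideLengths[i] == sideLengths[i - 1] or sideLengths[i] == sideLengths[i - 1] - 1:
--             if pending is None:
--                 pending = sideLengths[i]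
--             else:
--                 total += pending * sideLengths[i]
--                 pending = None
--             i += 2
--         else:
--             i += 1
--     return total
-- ===== Notes on version B (the rewrite author's own statement) =====
-- stated objective: simpler
-- what changed: A builds a pairs list guarded by an 'added' index set and then a second while-loop multiplies consecutive pair minimums; B fuses everything into one index scan over the sorted list with a single 'pending' pair-min accumulator, eliminating the pairs list and the set.
import Mathlib
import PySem

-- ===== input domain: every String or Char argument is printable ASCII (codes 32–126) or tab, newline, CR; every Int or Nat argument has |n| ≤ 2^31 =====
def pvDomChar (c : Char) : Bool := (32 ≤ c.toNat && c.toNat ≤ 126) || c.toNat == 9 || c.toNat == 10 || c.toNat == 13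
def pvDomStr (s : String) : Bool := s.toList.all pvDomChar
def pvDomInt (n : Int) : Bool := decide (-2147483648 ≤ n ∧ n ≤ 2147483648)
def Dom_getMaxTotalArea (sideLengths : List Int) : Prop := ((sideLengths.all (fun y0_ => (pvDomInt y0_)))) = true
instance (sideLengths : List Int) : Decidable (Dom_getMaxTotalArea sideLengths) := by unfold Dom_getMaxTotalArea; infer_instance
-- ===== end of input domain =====

-- B fuses A's two passes (build a pairs list with an 'added' set, then multiply pair-mins) into one
-- accumulator scan with a 'pending' variable (objective: simpler). Both Pythons sort the argument in
-- place (same mutation); the equivalence proved here is about the return value.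

-- ===== PORT A =====
-- loop body of A's 'for i in range(1, len(sideLengths))' (the Python's dead 'i += 1' inside the
-- for-loop is a no-op and is not ported)
def aStep (s : List Int) (st : List (List Int) × PySem.Set Int) (i : Int) :
    List (List Int) × PySem.Set Int :=
  let xi := PySem.List.pyGetD s i 0
  let xp := PySem.List.pyGetD s (i - 1) 0
  if ((xi == xp || xi == xp - 1) && !(PySem.Set.contains st.2 i)
        && !(PySem.Set.contains st.2 (i - 1))) then
    (st.1 ++ [[xp, xi]], PySem.Set.add (PySem.Set.add st.2 (i - 1)) i)
  else st

-- A's trailing 'while i < len(pairs): total += min(pairs[i]) * min(pairs[i-1]); i += 2'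
def aWhile (pairs : List (List Int)) (i : Int) (total : Int) : Int :=
  if i < (pairs.length : Int) then
    aWhile pairs (i + 2)
      (total + (PySem.List.min? (PySem.List.pyGetD pairs i []) (fun x => x)).getD 0
             * (PySem.List.min? (PySem.List.pyGetD pairs (i - 1) []) (fun x => x)).getD 0)
  else total
termination_by ((pairs.length : Int) - i).toNat
decreasing_by omega

def getMaxTotalArea (sideLengths : List Int) : Int :=
  let s := PySem.List.sorted sideLengths (fun x => x) true
  let st := (PySem.List.pyRange 1 (s.length : Int) 1).foldl (aStep s) ([], PySem.Set.empty)
  aWhile st.1 1 0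

-- ===== PORT B =====
-- B's single 'while i < len(sideLengths)' scan with the 'pending' pair-min
def bLoop (s : List Int) (i : Int) (pending : Option Int) (total : Int) : Int :=
  if i < (s.length : Int) then
    let xi := PySem.List.pyGetD s i 0
    let xp := PySem.List.pyGetD s (i - 1) 0
    if xi == xp || xi == xp - 1 then
      match pending with
      | none => bLoop s (i + 2) (some xi) total
      | some p => bLoop s (i + 2) none (total + p * xi)
    else bLoop s (i + 1) pending total
  else total
termination_by ((s.length : Int) - i).toNat
decreasing_by all_goals omega

def getMaxTotalArea_alt (sideLengths : List Int) : Int :=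
  bLoop (PySem.List.sorted sideLengths (fun x => x) true) 1 none 0

-- ===== PRECONDITION & SPEC =====
def Spec_getMaxTotalArea (sideLengths : List Int) (out : Int) : Prop := out = getMaxTotalArea_alt sideLengths
instance (sideLengths : List Int) (out : Int) : Decidable (Spec_getMaxTotalArea sideLengths out) := by unfold Spec_getMaxTotalArea; infer_instance

-- ===== CLAIM (what is proved, stated in full; the proofs are below) =====
def Claim_equal_getMaxTotalArea : Prop := ∀ (sideLengths : List Int), Dom_getMaxTotalArea sideLengths → Spec_getMaxTotalArea sideLengths (getMaxTotalArea sideLengths)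

-- ===== LEMMAS AND PROOFS =====

-- proof-side model of A's first loop: the pairs it appends, with 'flag' = "index i-1 is already paired"
def modelPairs (s : List Int) (i : Int) (flag : Bool) : List (List Int) :=
  if i < (s.length : Int) then
    let xi := PySem.List.pyGetD s i 0
    let xp := PySem.List.pyGetD s (i - 1) 0
    if (xi == xp || xi == xp - 1) && !flag then
      [xp, xi] :: modelPairs s (i + 1) true
    else modelPairs s (i + 1) false
  else []
termination_by ((s.length : Int) - i).toNat
decreasing_by all_goals omega

-- sum of min(p1)*min(p0) over consecutive disjoint pairs of the pairs list (a trailing odd one is dropped)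
def pairSum : List (List Int) → Int
  | p0 :: p1 :: t =>
      (PySem.List.min? p1 (fun x => x)).getD 0 * (PySem.List.min? p0 (fun x => x)).getD 0 + pairSum t
  | _ => 0

-- like pairSum but a pending pair-min p multiplies the first pair's min
def pairSumPend (p : Int) : List (List Int) → Int
  | [] => 0
  | pr :: t => p * (PySem.List.min? pr (fun x => x)).getD 0 + pairSum t

lemma contains_eq_false {s : PySem.Set Int} {x : Int} (h : x ∉ s) :
    PySem.Set.contains s x = false := by
  simp [PySem.Set.contains]; exact h

lemma contains_eq_true {s : PySem.Set Int} {x : Int} (h : x ∈ s) :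
    PySem.Set.contains s x = true := by
  simp [PySem.Set.contains]; exact h

-- A's for-loop, started at i with an 'added' set entirely below i, appends exactly modelPairs
lemma foldA (s : List Int) : ∀ (n : Nat) (i : Int) (pairs : List (List Int))
    (added : PySem.Set Int) (flag : Bool),
    n = (((s.length : Int)) - i).toNat → 1 ≤ i →
    (∀ j ∈ added, j < i) → ((i - 1) ∈ added ↔ flag = true) →
    ((PySem.List.pyRange i (s.length : Int) 1).foldl (aStep s) (pairs, added)).1
      = pairs ++ modelPairs s i flag := by
  intro n
  induction n with
  | zero =>
    intro i pairs added flag hn h1 _ _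
    have hge : ¬ i < (s.length : Int) := by omega
    rw [PySem.List.pyRange_one_eq_nil (by omega)]
    rw [modelPairs]
    simp [hge]
  | succ n ih =>
    intro i pairs added flag hn h1 hlt hflag
    by_cases hlen : i < (s.length : Int)
    · rw [PySem.List.pyRange_one_cons hlen, List.foldl_cons]
      have hci : PySem.Set.contains added i = false :=
        contains_eq_false (fun h => absurd (hlt i h) (by omega))
      have hcp : PySem.Set.contains added (i - 1) = flag := by
        cases flag with
        | false => exact contains_eq_false (fun h => by simp [h] at hflag)
        | true => exact contains_eq_true (hflag.mpr rfl)
      rw [modelPairs]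
      simp only [aStep, hci, hcp, hlen, if_pos]
      set xi := PySem.List.pyGetD s i 0 with hxi
      set xp := PySem.List.pyGetD s (i - 1) 0 with hxp
      by_cases hc : ((xi == xp || xi == xp - 1) && !flag) = true
      · simp only [hc, Bool.not_false, Bool.and_true, if_pos]
        rw [ih (i + 1) (pairs ++ [[xp, xi]]) (PySem.Set.add (PySem.Set.add added (i - 1)) i) true
          (by omega) (by omega)
          (by intro j hj
              rcases (PySem.Set.mem_add _ _ _).1 hj with hj' | hj'
              · rcases (PySem.Set.mem_add _ _ _).1 hj' with hj'' | hj''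
                · have := hlt j hj''; omega
                · omega
              · omega)
          (by constructor
              · intro _; rfl
              · intro _
                simp only [PySem.Set.mem_add]
                right; omega)]
        simp
      · simp only [Bool.not_false, Bool.and_true, hc, Bool.false_eq_true, if_neg, if_false]
        rw [ih (i + 1) pairs added false (by omega) (by omega)
          (by intro j hj; have := hlt j hj; omega)
          (by constructor
              · intro h
                have := hlt _ h; omega
              · intro h; simp at h)]
    · rw [PySem.List.pyRange_one_eq_nil (by omega)]
      rw [modelPairs]
      simp [hlen]

lemma pairSum_short {l : List (List Int)} (h : l.length ≤ 1) : pairSum l = 0 := by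
  match l, h with
  | [], _ => rfl
  | [_], _ => rfl

-- A's while-loop computes total + pairSum of the part of the pairs list from index i-1 on
lemma aWhile_eq (pairs : List (List Int)) : ∀ (n : Nat) (i total : Int), 1 ≤ i →
    (((pairs.length : Int)) - i).toNat ≤ n →
    aWhile pairs i total = total + pairSum (pairs.drop (i - 1).toNat) := by
  intro n
  induction n with
  | zero =>
    intro i total h1 hn
    rw [aWhile]
    have hge : ¬ i < (pairs.length : Int) := by omega
    rw [if_neg hge, pairSum_short (by simp; omega)]
    ring
  | succ n ih =>
    intro i total h1 hn
    rw [aWhile]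
    by_cases hlen : i < (pairs.length : Int)
    · rw [if_pos hlen]
      rw [ih (i + 2) _ (by omega) (by omega)]
      have h0 : (i - 1).toNat < pairs.length := by omega
      have h0' : (i - 1).toNat + 1 < pairs.length := by omega
      rw [List.drop_eq_getElem_cons h0, List.drop_eq_getElem_cons h0']
      have hi1 : (i - 1).toNat + 1 = i.toNat := by omega
      have hi2 : (i - 1).toNat + 1 + 1 = (i + 2 - 1).toNat := by omega
      rw [hi2, pairSum]
      rw [PySem.List.pyGetD_eq_getElem pairs [] (by omega) hlen,
          PySem.List.pyGetD_eq_getElem pairs [] (by omega) (by omega : i - 1 < (pairs.length : Int))]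
      simp only [hi1]
      ring
    · rw [if_neg hlen, pairSum_short (by simp; omega)]
      ring

-- skipping one already-paired position: the model at (i+1, paired) equals the model at (i+2, fresh)
lemma modelPairs_true (s : List Int) (i : Int) :
    modelPairs s (i + 1) true = modelPairs s (i + 2) false := by
  rw [modelPairs]
  by_cases h : i + 1 < (s.length : Int)
  · simp only [h, if_pos]
    simp only [Bool.not_true, Bool.and_false, Bool.false_eq_true, if_false]
    rw [show i + 1 + 1 = i + 2 by ring]
  · rw [if_neg h, modelPairs, if_neg (by omega)]

-- under the adjacency condition the min of the pair [xp, xi] is xi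
lemma min_pair {xi xp : Int} (h : (xi == xp || xi == xp - 1) = true) :
    (PySem.List.min? [xp, xi] (fun x => x)).getD 0 = xi := by
  rw [PySem.List.min?_id_cons]
  simp only [List.foldl, Option.getD_some]
  rcases (by simpa using h : xi = xp ∨ xi = xp - 1) with h' | h' <;> simp [h', min_def] <;> omega

-- B's scan computes total + the pending-aware pair sum of the model from index i on
lemma bLoop_eq (s : List Int) : ∀ (n : Nat) (i : Int) (pending : Option Int) (total : Int),
    1 ≤ i → (((s.length : Int)) - i).toNat ≤ n →
    bLoop s i pending total = total + (match pending with
      | none => pairSum (modelPairs s i false)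
      | some p => pairSumPend p (modelPairs s i false)) := by
  intro n
  induction n with
  | zero =>
    intro i pending total h1 hn
    have hge : ¬ i < (s.length : Int) := by omega
    rw [bLoop, if_neg hge, modelPairs, if_neg hge]
    cases pending <;> simp [pairSum, pairSumPend]
  | succ n ih =>
    intro i pending total h1 hn
    rw [bLoop, modelPairs]
    by_cases hlen : i < (s.length : Int)
    · simp only [hlen, if_pos]
      set xi := PySem.List.pyGetD s i 0 with hxi
      set xp := PySem.List.pyGetD s (i - 1) 0 with hxp
      by_cases hc : (xi == xp || xi == xp - 1) = true
      · simp only [hc, Bool.not_false, Bool.and_true, if_pos]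
        rw [modelPairs_true]
        cases pending with
        | none =>
          dsimp only
          rw [ih (i + 2) (some xi) total (by omega) (by omega)]
          cases hM : modelPairs s (i + 2) false with
          | nil => simp [pairSum, pairSumPend]
          | cons pr t =>
            simp only [pairSum, pairSumPend, min_pair hc]
            ring
        | some p =>
          dsimp only
          rw [ih (i + 2) none _ (by omega) (by omega)]
          simp only [pairSumPend, min_pair hc]
          ring
      · simp only [hc, Bool.false_and, Bool.false_eq_true, if_neg, if_false]
        rw [ih (i + 1) pending total (by omega) (by omega)]
    · simp only [hlen, if_neg, if_false]
      cases pending <;> simp [pairSum, pairSumPend]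

-- ===== VERDICT (by name: the statement is the Claim_ definition above) =====
theorem getMaxTotalArea_spec : Claim_equal_getMaxTotalArea := by
  intro sideLengths _
  unfold Spec_getMaxTotalArea getMaxTotalArea getMaxTotalArea_alt
  dsimp only
  set s := PySem.List.sorted sideLengths (fun x => x) true with hs
  have hfold := foldA s (((s.length : Int)) - 1).toNat 1 [] PySem.Set.empty false
    rfl (by omega) (by intro j hj; simp [PySem.Set.empty] at hj) (by simp [PySem.Set.empty])
  simp only [List.nil_append] at hfold
  rw [hfold]
  rw [aWhile_eq _ ((((modelPairs s 1 false).length : Int)) - 1).toNat 1 0 (by omega) (by omega)]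
  rw [bLoop_eq s (((s.length : Int)) - 1).toNat 1 none 0 (by omega) (by omega)]
  norm_num
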